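-- pv_equiv track=rewrite | github.com/sirfifer/solution-explorer | analyze.py | extract_file_doc
-- ===== SOURCE A (Python) =====
-- from typing import Optional
--
-- def extract_file_doc(content: str) -> Optional[str]:
--     """Extract Rust file-level //! documentation."""
--     lines = content.split("\n")
--     doc_lines = []
--     for line in lines:
--         stripped = line.strip()
--         if stripped.startswith("//!"):
--             doc_lines.append(stripped[3:].strip())
--         elif stripped.startswith("//") or not stripped:
--             continue
--         else:
--             break
--     return "\n".join(doc_lines) if doc_lines else None
-- ===== SOURCE B (Python) =====
-- from typing import Optional
--
-- def extract_file_doc(content: str) -> Optional[str]: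
--     """Extract Rust file-level //! documentation (two-pass: locate the
--     comment/blank prefix, then collect the //! lines from it)."""
--     stripped = [line.strip() for line in content.split("\n")]
--     end = next((i for i, s in enumerate(stripped)
--                 if s and not s.startswith("//")), len(stripped))
--     docs = [s[3:].strip() for s in stripped[:end] if s.startswith("//!")]
--     return "\n".join(docs) if docs else None
-- ===== Notes on version B (the rewrite author's own statement) =====
-- stated objective: alternative
-- what changed: Replaces A's single fused loop-with-break by two passes: first find the end of the leading comment/blank prefix with next(enumerate(...)) over pre-stripped lines, then a list comprehension extracts the //! lines from that prefix.
import Mathlib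
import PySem

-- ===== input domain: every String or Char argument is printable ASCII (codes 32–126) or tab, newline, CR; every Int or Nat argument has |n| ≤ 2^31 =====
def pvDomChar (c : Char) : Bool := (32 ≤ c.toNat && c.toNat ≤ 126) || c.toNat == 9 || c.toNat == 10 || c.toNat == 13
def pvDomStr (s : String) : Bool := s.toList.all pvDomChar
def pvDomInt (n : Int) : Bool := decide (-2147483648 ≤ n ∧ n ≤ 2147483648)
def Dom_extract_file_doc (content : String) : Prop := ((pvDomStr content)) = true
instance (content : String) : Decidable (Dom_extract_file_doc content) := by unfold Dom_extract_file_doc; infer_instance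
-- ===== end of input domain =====

-- B replaces A's fused loop-with-break by two passes (find the end of the comment/blank prefix, then extract //! lines from it); alternative decomposition, same cost.


-- ===== PORT A =====
-- A's for-loop with continue/break, as structural recursion over the lines
def pvGoA : List String → List String
  | [] => []
  | l :: ls =>
    let stripped := PySem.Str.strip l
    if PySem.Str.startswith stripped "//!" then
      PySem.Str.strip (PySem.Str.slice stripped (some 3) none) :: pvGoA ls
    else if PySem.Str.startswith stripped "//" || stripped == "" then
      pvGoA ls
    else
      []

def extract_file_doc (content : String) : Option String :=
  let lines := (PySem.Str.split? content "\n").getD []   -- sep "\n" ≠ "": split? is always some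
  let docLines := pvGoA lines
  if docLines.isEmpty then none else some (PySem.Str.join "\n" docLines)

-- ===== PORT B =====
def pvNotDocPrefix (s : String) : Bool := !(s == "" || PySem.Str.startswith s "//")

def extract_file_doc_alt (content : String) : Option String :=
  let stripped := ((PySem.Str.split? content "\n").getD []).map PySem.Str.strip
  -- next((i for i, s in enumerate(stripped) if s and not s.startswith("//")), len(stripped))
  let e := stripped.findIdx pvNotDocPrefix
  -- [s[3:].strip() for s in stripped[:end] if s.startswith("//!")]
  let docs := ((stripped.take e).filter (fun s => PySem.Str.startswith s "//!")).map
      (fun s => PySem.Str.strip (PySem.Str.slice s (some 3) none))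
  if docs.isEmpty then none else some (PySem.Str.join "\n" docs)

-- ===== PRECONDITION & SPEC =====
def Spec_extract_file_doc (content : String) (out : Option String) : Prop := out = extract_file_doc_alt content
instance (content : String) (out : Option String) : Decidable (Spec_extract_file_doc content out) := by unfold Spec_extract_file_doc; infer_instance

-- ===== CLAIM (what is proved, stated in full; the proofs are below) =====
def Claim_equal_extract_file_doc : Prop := ∀ (content : String), Dom_extract_file_doc content → Spec_extract_file_doc content (extract_file_doc content)

-- ===== LEMMAS AND PROOFS =====

lemma startswith_bang_imp (cs : List Char) (h : PySem.Chars.startswith cs ['/', '/', '!'] = true) :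
    PySem.Chars.startswith cs ['/', '/'] = true := by
  simp only [PySem.Chars.startswith, List.isPrefixOf_iff_prefix] at *
  exact List.IsPrefix.trans (by decide) h

lemma pvGoA_eq (ls : List String) :
    pvGoA ls =
      (((ls.map PySem.Str.strip).take ((ls.map PySem.Str.strip).findIdx pvNotDocPrefix)).filter
          (fun s => PySem.Str.startswith s "//!")).map
        (fun s => PySem.Str.strip (PySem.Str.slice s (some 3) none)) := by
  induction ls with
  | nil => simp [pvGoA]
  | cons l ls ih =>
    by_cases h1 : PySem.Chars.startswith (PySem.Chars.strip l.toList) ['/', '/', '!'] = true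
    · have h2 := startswith_bang_imp _ h1
      simp [pvGoA, pvNotDocPrefix, List.findIdx_cons, ih, h1, h2]
    · by_cases h2 : PySem.Chars.startswith (PySem.Chars.strip l.toList) ['/', '/'] = true
      · simp [pvGoA, pvNotDocPrefix, List.findIdx_cons, ih, h1, h2]
      · by_cases h3 : PySem.Str.strip l = ""
        · simp [pvGoA, pvNotDocPrefix, List.findIdx_cons, ih, h3,
            (by decide : PySem.Chars.startswith [] ['/', '/', '!'] = false)]
        · have h3' : (PySem.Str.strip l == "") = false := by simpa using h3
          simp [pvGoA, pvNotDocPrefix, List.findIdx_cons, h1, h2, h3']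

-- ===== VERDICT (by name: the statement is the Claim_ definition above) =====
theorem extract_file_doc_spec : Claim_equal_extract_file_doc := by
  intro content _
  unfold Spec_extract_file_doc extract_file_doc extract_file_doc_alt
  simp only [pvGoA_eq]
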